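-- pv_equiv track=rewrite | github.com/rubydusa/proof-of-life | golsvg/main2.py | remove_consecutives
-- ===== SOURCE A (Python) =====
-- def remove_consecutives(l: list[int]) -> list[int]:
--     """
--     remove in-betweens of consecutive sequences:
--
--     0 1 2 4 5 6 9 ->
--     0 - 2 4 - 6 9
--     """
--     if len(l) <= 2:
--         return l
--
--     result = [l[0]]
--     for x, y, z in zip(l, l[1:], l[2:]):
--         if not (y - x == 1 and z - y == 1):
--             result.append(y)
--     result.append(l[-1])
--     return result
-- ===== SOURCE B (Python) =====
-- def remove_consecutives(l: list[int]) -> list[int]: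
--     """Group the list into maximal runs of +1 steps and emit each run's
--     endpoints (start, and end only if the run has length > 1)."""
--     out = []
--     i = 0
--     n = len(l)
--     while i < n:
--         j = i
--         while j + 1 < n and l[j + 1] - l[j] == 1:
--             j += 1
--         out.append(l[i])
--         if j > i:
--             out.append(l[j])
--         i = j + 1
--     return out
-- ===== Notes on version B (the rewrite author's own statement) =====
-- stated objective: alternative
-- what changed: Replaces A's first/last special-casing plus a sliding three-element window filter with a single scan that partitions the list into maximal +1 runs and emits each run's start and (if longer than one) end.
import Mathlib
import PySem

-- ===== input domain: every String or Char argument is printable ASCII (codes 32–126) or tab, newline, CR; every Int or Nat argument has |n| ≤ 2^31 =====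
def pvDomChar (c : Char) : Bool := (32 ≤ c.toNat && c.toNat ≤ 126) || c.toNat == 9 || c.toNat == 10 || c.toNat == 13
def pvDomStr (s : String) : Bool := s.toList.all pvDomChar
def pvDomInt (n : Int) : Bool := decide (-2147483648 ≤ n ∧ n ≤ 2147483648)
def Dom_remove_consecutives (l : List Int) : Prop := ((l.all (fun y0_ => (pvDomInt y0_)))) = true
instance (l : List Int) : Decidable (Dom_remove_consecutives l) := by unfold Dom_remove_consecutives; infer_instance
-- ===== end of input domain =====

-- B groups the list into maximal +1 runs and emits each run's endpoints, replacing
-- A's sliding triple-window filter; objective: simpler decomposition (same O(n) cost).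

-- ===== PORT A =====
-- zip(l, l[1:], l[2:]) as nested pairs; the loop appends the middle element y
-- unless it is interior to a +1 run; l[-1] via PySem.List.pyGet? (l nonempty here).
def remove_consecutives (l : List Int) : List Int :=
  if l.length ≤ 2 then l
  else
    let triples := (l.zip (l.drop 1)).zip (l.drop 2)
    let result := triples.foldl
      (fun acc t =>
        if ¬ (t.1.2 - t.1.1 = 1 ∧ t.2 - t.1.2 = 1) then acc ++ [t.1.2] else acc)
      [l.headI]
    result ++ [(PySem.List.pyGet? l (-1)).getD 0]

-- ===== PORT B =====
-- rcGo s c rest: s is the current run's start value, c its last value so far.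
def rcGo (s c : Int) : List Int → List Int
  | [] => if s = c then [s] else [s, c]
  | x :: xs =>
      if x - c = 1 then rcGo s x xs
      else (if s = c then [s] else [s, c]) ++ rcGo x x xs

def remove_consecutives_alt : List Int → List Int
  | [] => []
  | x :: xs => rcGo x x xs

-- ===== PRECONDITION & SPEC =====
def Spec_remove_consecutives (l : List Int) (out : List Int) : Prop := out = remove_consecutives_alt l
instance (l : List Int) (out : List Int) : Decidable (Spec_remove_consecutives l out) := by unfold Spec_remove_consecutives; infer_instance

-- ===== CLAIM (what is proved, stated in full; the proofs are below) =====
def Claim_equal_remove_consecutives : Prop := ∀ (l : List Int), Dom_remove_consecutives l → Spec_remove_consecutives l (remove_consecutives l)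

-- ===== LEMMAS AND PROOFS =====

-- the middle elements A keeps (all but the first and last, filtered by the triple test)
def Mid : List Int → List Int
  | x :: y :: z :: r => (if y - x = 1 ∧ z - y = 1 then [] else [y]) ++ Mid (y :: z :: r)
  | _ => []

lemma fold_trip (l acc : List Int) :
    ((l.zip (l.drop 1)).zip (l.drop 2)).foldl
      (fun acc t =>
        if ¬ (t.1.2 - t.1.1 = 1 ∧ t.2 - t.1.2 = 1) then acc ++ [t.1.2] else acc)
      acc = acc ++ Mid l := by
  induction l generalizing acc with
  | nil => simp [Mid]
  | cons x t ih =>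
    match t with
    | [] => simp [Mid]
    | [y] => simp [Mid]
    | y :: z :: r =>
      have hz : (((x::y::z::r).zip (List.drop 1 (x::y::z::r))).zip (List.drop 2 (x::y::z::r))) =
          ((x,y),z) :: (((y::z::r).zip (List.drop 1 (y::z::r))).zip (List.drop 2 (y::z::r))) := by
        simp [List.zip]
      rw [hz, List.foldl_cons, ih]
      by_cases h : y - x = 1 ∧ z - y = 1 <;> simp [h, Mid]

-- last element of z :: r with default c is the last element of r with default z
lemma lastD_cons (r : List Int) (z c : Int) : (z :: r).getLast?.getD c = r.getLast?.getD z := by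
  induction r generalizing z c with
  | nil => rfl
  | cons w r' ih => rw [List.getLast?_cons_cons, ih, ih]

-- combined invariant for B's scanner, proved by strong induction on the tail length
lemma rcGo_spec (n : Nat) :
    ∀ t : List Int, t.length = n →
      (∀ s c : Int, s < c →
        rcGo s c t = s :: Mid ((c - 1) :: c :: t) ++ [t.getLastD c]) ∧
      (∀ x y : Int, rcGo x x (y :: t) = x :: Mid (x :: y :: t) ++ [t.getLastD y]) := by
  induction n using Nat.strong_induction_on with
  | _ n ih =>
    intro t ht
    have Q : ∀ s c : Int, s < c →
        rcGo s c t = s :: Mid ((c - 1) :: c :: t) ++ [t.getLastD c] := by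
      intro s c hsc
      match t with
      | [] =>
        simp only [rcGo, Mid]
        rw [if_neg (by omega : ¬ s = c)]
        simp
      | z :: r =>
        simp only [rcGo]
        by_cases h1 : z - c = 1
        · rw [if_pos h1]
          have hr := (ih r.length (by simp [← ht]) r rfl).1 s z (by omega)
          rw [hr]
          simp [Mid, h1, show z - 1 = c by omega, lastD_cons]
        · rw [if_neg h1, if_neg (by omega : ¬ s = c)]
          match r with
          | [] =>
            simp [rcGo, Mid, h1]
          | w :: r' =>
            have hp := (ih r'.length (by simp [← ht]) r' rfl).2 z w
            rw [hp]
            by_cases h2 : w - z = 1 <;> simp [Mid, h1, h2, lastD_cons]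
    refine ⟨Q, ?_⟩
    intro x y
    simp only [rcGo]
    by_cases h1 : y - x = 1
    · rw [if_pos h1, Q x y (by omega)]
      rw [show y - 1 = x by omega]
    · rw [if_neg h1]
      match t with
      | [] => simp [rcGo, Mid]
      | z :: r =>
        have hp := (ih r.length (by simp [← ht]) r rfl).2 y z
        rw [hp]
        by_cases h2 : z - y = 1 <;> simp [Mid, h1, h2, lastD_cons]

-- ===== VERDICT (by name: the statement is the Claim_ definition above) =====
theorem remove_consecutives_spec : Claim_equal_remove_consecutives := by
  intro l _
  unfold Spec_remove_consecutives
  match l with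
  | [] => rfl
  | [a] => simp [remove_consecutives, remove_consecutives_alt, rcGo]
  | [a, b] =>
    by_cases h : b - a = 1
    · simp only [remove_consecutives, remove_consecutives_alt, rcGo]
      simp [h]
      omega
    · simp [remove_consecutives, remove_consecutives_alt, rcGo, h]
  | x :: y :: z :: r =>
    have hB := (rcGo_spec (z :: r).length (z :: r) rfl).2 x y
    simp only [remove_consecutives_alt]
    rw [hB]
    simp only [remove_consecutives]
    rw [if_neg (by simp)]
    simp only [fold_trip]
    rw [PySem.List.pyGet?_neg_one]
    simp [lastD_cons]
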